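-- pv_equiv track=rewrite | github.com/ngocminh1511/Search_wheather_forecast_app | noaa_be/app/core/discovery.py | _infer_segments
-- ===== SOURCE A (Python) =====
-- def _infer_segments(values: list[int]) -> list[tuple[int, int, int]]:
--     if not values:
--         return []
--     if len(values) == 1:
--         return [(values[0], values[0], 1)]
--     segments: list[tuple[int, int, int]] = []
--     start = prev = values[0]
--     step = values[1] - values[0]
--     for cur in values[1:]:
--         cur_step = cur - prev
--         if cur_step != step:
--             segments.append((start, prev, step))
--             start = prev
--             step = cur_step
--         prev = cur
--     segments.append((start, prev, step))
--     return segments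
-- ===== SOURCE B (Python) =====
-- def _infer_segments(values: list[int]) -> list[tuple[int, int, int]]:
--     if not values:
--         return []
--     if len(values) == 1:
--         return [(values[0], values[0], 1)]
--     n = len(values)
--     segments: list[tuple[int, int, int]] = []
--     i = 0
--     while i < n - 1:
--         step = values[i + 1] - values[i]
--         k = i + 1
--         while k + 1 < n and values[k + 1] - values[k] == step:
--             k += 1
--         segments.append((values[i], values[k], step))
--         i = k
--     return segments
-- ===== Notes on version B (the rewrite author's own statement) =====
-- stated objective: alternative
-- what changed: B peels maximal arithmetic runs: an outer loop jumps from run start to run start and for each one an inner while-scan finds the run end k, emitting (values[i], values[k], step) per run, instead of A's single pass over all elements with a rolling start/prev/step state machine and a trailing append.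
import Mathlib
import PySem

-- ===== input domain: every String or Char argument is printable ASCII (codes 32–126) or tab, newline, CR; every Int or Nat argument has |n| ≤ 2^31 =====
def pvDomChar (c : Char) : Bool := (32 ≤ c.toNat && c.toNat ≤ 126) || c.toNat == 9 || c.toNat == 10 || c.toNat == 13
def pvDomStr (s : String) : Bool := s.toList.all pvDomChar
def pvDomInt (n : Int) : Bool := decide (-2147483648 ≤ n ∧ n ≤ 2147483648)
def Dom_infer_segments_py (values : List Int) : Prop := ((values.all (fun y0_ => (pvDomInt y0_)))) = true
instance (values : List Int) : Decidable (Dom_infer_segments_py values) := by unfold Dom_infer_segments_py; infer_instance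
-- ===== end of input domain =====

-- B peels maximal arithmetic runs (outer loop over run starts, inner scan for the run end)
-- instead of A's single-pass rolling start/prev/step state machine; objective: alternative, same cost.

-- ===== PORT A =====
-- loop body of A's 'for cur in values[1:]' over the state (segments, start, prev, step)
def stepA (s : List (Int × Int × Int) × Int × Int × Int) (cur : Int) :
    List (Int × Int × Int) × Int × Int × Int :=
  let cur_step := cur - s.2.2.1
  if cur_step ≠ s.2.2.2 then
    (s.1 ++ [(s.2.1, s.2.2.1, s.2.2.2)], s.2.2.1, cur, cur_step)
  else
    (s.1, s.2.1, cur, s.2.2.2)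

def infer_segments_py (values : List Int) : List (Int × Int × Int) :=
  match values with
  | [] => []
  | [v] => [(v, v, 1)]
  | v0 :: v1 :: rest =>
    -- start = prev = values[0]; step = values[1] - values[0]; loop over values[1:]
    let st := (v1 :: rest).foldl stepA ([], v0, v0, v1 - v0)
    st.1 ++ [(st.2.1, st.2.2.1, st.2.2.2)]

-- ===== PORT B =====
-- B's inner 'while k + 1 < n and values[k+1] - values[k] == step: k += 1';
-- every index it reads is in range, so List.getD is exact for values[·].
def runEnd (values : List Int) (step : Int) (k : Nat) : Nat :=
  if h : k + 1 < values.length ∧ values.getD (k + 1) 0 - values.getD k 0 = step then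
    runEnd values step (k + 1)
  else k
termination_by values.length - k
decreasing_by omega

-- the outer loop needs k > i for termination
lemma runEnd_ge (values : List Int) (step : Int) : ∀ k : Nat, k ≤ runEnd values step k := by
  intro k
  obtain ⟨m, hm⟩ : ∃ m, values.length - k = m := ⟨_, rfl⟩
  induction m generalizing k with
  | zero => rw [runEnd, dif_neg (by omega)]
  | succ m ih =>
    by_cases hc : k + 1 < values.length ∧ values.getD (k + 1) 0 - values.getD k 0 = step
    · rw [runEnd, dif_pos hc]
      have := ih (k + 1) (by omega)
      omega
    · rw [runEnd, dif_neg hc]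

-- B's outer 'while i < n - 1' over the state (segments, i)
def outerB (values : List Int) (segments : List (Int × Int × Int)) (i : Nat) :
    List (Int × Int × Int) :=
  if _h : i < values.length - 1 then
    let step := values.getD (i + 1) 0 - values.getD i 0
    let k := runEnd values step (i + 1)
    outerB values (segments ++ [(values.getD i 0, values.getD k 0, step)]) k
  else segments
termination_by values.length - i
decreasing_by
  have := runEnd_ge values (values.getD (i + 1) 0 - values.getD i 0) (i + 1)
  omega

def infer_segments_py_alt (values : List Int) : List (Int × Int × Int) :=
  match values with
  | [] => []
  | [v] => [(v, v, 1)]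
  | _ :: _ :: _ => outerB values [] 0

-- ===== PRECONDITION & SPEC =====
def Spec_infer_segments_py (values : List Int) (out : List (Int × Int × Int)) : Prop := out = infer_segments_py_alt values
instance (values : List Int) (out : List (Int × Int × Int)) : Decidable (Spec_infer_segments_py values out) := by unfold Spec_infer_segments_py; infer_instance

-- ===== CLAIM (what is proved, stated in full; the proofs are below) =====
def Claim_equal_infer_segments_py : Prop := ∀ (values : List Int), Dom_infer_segments_py values → Spec_infer_segments_py values (infer_segments_py values)

-- ===== LEMMAS AND PROOFS =====

-- A's loop, characterised recursively: remaining list, current (start, prev, step)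
def core (start prev step : Int) : List Int → List (Int × Int × Int)
  | [] => [(start, prev, step)]
  | c :: l =>
    if c - prev ≠ step then (start, prev, step) :: core prev c (c - prev) l
    else core start c step l

lemma foldA_core (l : List Int) : ∀ (segs : List (Int × Int × Int)) (start prev step : Int),
    (l.foldl stepA (segs, start, prev, step)).1
      ++ [((l.foldl stepA (segs, start, prev, step)).2.1,
           (l.foldl stepA (segs, start, prev, step)).2.2.1,
           (l.foldl stepA (segs, start, prev, step)).2.2.2)]
    = segs ++ core start prev step l := by
  induction l with
  | nil => intro segs start prev step; simp [core]
  | cons c l ih =>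
    intro segs start prev step
    by_cases hc : c - prev = step
    · simp only [List.foldl_cons, stepA, hc, ne_eq, not_true_eq_false, if_false, core, ih]
    · simp only [List.foldl_cons, stepA, core, ne_eq, hc, not_false_eq_true, if_true, ih,
        List.append_assoc, List.singleton_append]

lemma runEnd_lt (values : List Int) (step : Int) :
    ∀ k : Nat, k < values.length → runEnd values step k < values.length := by
  intro k
  obtain ⟨m, hm⟩ : ∃ m, values.length - k = m := ⟨_, rfl⟩
  induction m generalizing k with
  | zero => intro h; omega
  | succ m ih =>
    intro h
    by_cases hc : k + 1 < values.length ∧ values.getD (k + 1) 0 - values.getD k 0 = step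
    · rw [runEnd, dif_pos hc]
      exact ih (k + 1) (by omega) hc.1
    · rw [runEnd, dif_neg hc]
      exact h

-- core consumes exactly one maximal run: from position j (prev = values[j]) it emits
-- (start, values[k], step) with k = runEnd values step j, then continues past k
lemma core_run (values : List Int) (step start : Int) :
    ∀ j : Nat, j < values.length →
    core start (values.getD j 0) step (values.drop (j + 1))
      = (let k := runEnd values step j
         if k = values.length - 1 then [(start, values.getD k 0, step)]
         else (start, values.getD k 0, step)
              :: core (values.getD k 0) (values.getD (k + 1) 0)
                   (values.getD (k + 1) 0 - values.getD k 0) (values.drop (k + 2))) := by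
  intro j
  obtain ⟨m, hm⟩ : ∃ m, values.length - j = m := ⟨_, rfl⟩
  induction m generalizing j with
  | zero => intro h; omega
  | succ m ih =>
    intro h
    by_cases hc : j + 1 < values.length ∧ values.getD (j + 1) 0 - values.getD j 0 = step
    · -- run continues: drop (j+1) starts with values[j+1] whose diff is step
      have hdrop : values.drop (j + 1) = values.getD (j + 1) 0 :: values.drop (j + 2) := by
        rw [List.getD_eq_getElem _ _ hc.1]
        exact List.drop_eq_getElem_cons hc.1
      rw [hdrop, core, if_neg (by simpa using hc.2), runEnd, dif_pos hc]
      exact ih (j + 1) (by omega) hc.1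
    · rw [runEnd, dif_neg hc]
      by_cases hend : j + 1 < values.length
      · -- run ends because the next diff differs
        have hdrop : values.drop (j + 1) = values.getD (j + 1) 0 :: values.drop (j + 2) := by
          rw [List.getD_eq_getElem _ _ hend]
          exact List.drop_eq_getElem_cons hend
        have hne : values.getD (j + 1) 0 - values.getD j 0 ≠ step := by
          intro he; exact hc ⟨hend, he⟩
        rw [hdrop, core, if_pos (by simpa using hne)]
        simp only []
        rw [if_neg (by omega)]
      · -- run ends at the last element
        have hdrop : values.drop (j + 1) = [] := List.drop_eq_nil_of_le (by omega)
        rw [hdrop, core]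
        simp only []
        rw [if_pos (by omega)]

-- the outer loop, holding a partial segment list, produces segs ++ (what core produces)
lemma outer_core (values : List Int) :
    ∀ i : Nat, ∀ segs : List (Int × Int × Int), i + 1 < values.length →
    outerB values segs i
      = segs ++ core (values.getD i 0) (values.getD (i + 1) 0)
          (values.getD (i + 1) 0 - values.getD i 0) (values.drop (i + 2)) := by
  intro i
  obtain ⟨m, hm⟩ : ∃ m, values.length - i ≤ m := ⟨_, le_rfl⟩
  induction m generalizing i with
  | zero => intro segs h; omega
  | succ m ih =>
    intro segs h
    rw [outerB, dif_pos (by omega)]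
    have hrun := core_run values (values.getD (i + 1) 0 - values.getD i 0)
      (values.getD i 0) (i + 1) (by omega)
    set step := values.getD (i + 1) 0 - values.getD i 0 with hstep
    set k := runEnd values step (i + 1) with hk
    have hge : i + 1 ≤ k := runEnd_ge values step (i + 1)
    have hlt : k < values.length := runEnd_lt values step (i + 1) (by omega)
    simp only [] at hrun ⊢
    rw [hrun]
    by_cases hend : k = values.length - 1
    · rw [if_pos hend, outerB, dif_neg (by omega)]
    · rw [if_neg hend]
      rw [ih k (by omega) (segs ++ [(values.getD i 0, values.getD k 0, step)]) (by omega)]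
      simp

-- ===== VERDICT (by name: the statement is the Claim_ definition above) =====
theorem infer_segments_py_spec : Claim_equal_infer_segments_py := by
  intro values _
  unfold Spec_infer_segments_py
  match values with
  | [] => simp [infer_segments_py, infer_segments_py_alt]
  | [v] => simp [infer_segments_py, infer_segments_py_alt]
  | v0 :: v1 :: rest =>
    have hA : infer_segments_py (v0 :: v1 :: rest) = [] ++ core v0 v0 (v1 - v0) (v1 :: rest) := by
      rw [infer_segments_py]
      exact foldA_core (v1 :: rest) [] v0 v0 (v1 - v0)
    have hB : infer_segments_py_alt (v0 :: v1 :: rest)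
        = [] ++ core v0 v1 (v1 - v0) rest := by
      rw [infer_segments_py_alt]
      exact outer_core (v0 :: v1 :: rest) 0 [] (by simp)
    rw [hA, hB, core, if_neg (by simp)]
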